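-- pv_equiv track=rewrite | github.com/mekpro/maasi_web | webHandler.py | genHostTree
-- ===== SOURCE A (Python) =====
-- def genHostTree(hostlist):
--   r = dict()
--   for host in hostlist:
--     p = host.split("__")
--     r[p[0]] = list()
--   for host in hostlist:
--     p = host.split("__")
--     if len(p) > 1:
--       r[p[0]].append(p[1])
--   return r
-- ===== SOURCE B (Python) =====
-- def genHostTree(hostlist):
--   parts = [host.split("__") for host in hostlist]
--   keys = list(dict.fromkeys(p[0] for p in parts))
--   return {k: [p[1] for p in parts if len(p) > 1 and p[0] == k] for k in keys}
-- ===== Notes on version B (the rewrite author's own statement) =====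
-- stated objective: alternative
-- what changed: Instead of building a mutable dict incrementally (A's two passes with per-host appends), B first splits all hosts, computes the ordered-deduplicated key list with dict.fromkeys, and then constructs the result in one dict comprehension that, for each key, collects its suffixes by a filtered scan of the split list; it trades A's O(n) incremental mutation for an O(n*k) per-key grouping with no dict mutation at all.
import Mathlib
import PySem

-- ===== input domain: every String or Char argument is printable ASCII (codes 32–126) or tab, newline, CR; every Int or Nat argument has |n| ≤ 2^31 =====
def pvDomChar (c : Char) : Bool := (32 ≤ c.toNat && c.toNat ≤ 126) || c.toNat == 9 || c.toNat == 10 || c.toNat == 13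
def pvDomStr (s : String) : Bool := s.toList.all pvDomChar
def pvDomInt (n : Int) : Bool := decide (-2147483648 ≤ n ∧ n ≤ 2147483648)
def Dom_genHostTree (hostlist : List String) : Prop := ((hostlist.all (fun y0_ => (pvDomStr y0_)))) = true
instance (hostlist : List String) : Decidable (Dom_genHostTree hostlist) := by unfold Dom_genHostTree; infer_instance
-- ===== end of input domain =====

-- B replaces A's incremental two-pass dict mutation by splitting all hosts once, taking the
-- ordered-deduplicated key list (dict.fromkeys), and building the result as one dict
-- comprehension with a filtered scan per key; objective: alternative (no dict mutation).

-- ===== PORT A =====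
-- host.split("__"): sep ≠ "", so PySem.Str.split? is always `some`; `.getD []` is exact.
def genHostTree (hostlist : List String) : List (String × List String) :=
  (hostlist.foldl
    (fun r host =>
      let p := (PySem.Str.split? host "__").getD []
      if p.length > 1 then
        -- r[p[0]].append(p[1]): p[0] is always a key here (inserted by the first loop)
        r.modify (PySem.List.pyGetD p 0 "") [] (fun l => l ++ [PySem.List.pyGetD p 1 ""])
      else r)
    (hostlist.foldl
      (fun r host =>
        let p := (PySem.Str.split? host "__").getD []
        r.insert (PySem.List.pyGetD p 0 "") [])
      (PySem.Dict.empty : PySem.Dict String (List String)))).items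

-- ===== PORT B =====
-- list(dict.fromkeys(…)) is PySem.List.dedup (first occurrences, in order).
def genHostTree_alt (hostlist : List String) : List (String × List String) :=
  let parts := hostlist.map (fun host => (PySem.Str.split? host "__").getD [])
  let keys := PySem.List.dedup (parts.map (fun p => PySem.List.pyGetD p 0 ""))
  keys.map (fun k => (k,
    (parts.filter (fun p => decide (p.length > 1) && (PySem.List.pyGetD p 0 "" == k))).map
      (fun p => PySem.List.pyGetD p 1 "")))

-- ===== PRECONDITION & SPEC =====
def Spec_genHostTree (hostlist : List String) (out : List (String × List String)) : Prop := out = genHostTree_alt hostlist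
instance (hostlist : List String) (out : List (String × List String)) : Decidable (Spec_genHostTree hostlist out) := by unfold Spec_genHostTree; infer_instance

-- ===== CLAIM (what is proved, stated in full; the proofs are below) =====
def Claim_equal_genHostTree : Prop := ∀ (hostlist : List String), Dom_genHostTree hostlist → Spec_genHostTree hostlist (genHostTree hostlist)

-- ===== LEMMAS AND PROOFS =====

-- the pieces of host.split("__") both programs use
def hostParts (host : String) : List String := (PySem.Str.split? host "__").getD []
def keyOf (host : String) : String := PySem.List.pyGetD (hostParts host) 0 ""
def sufOf (host : String) : String := PySem.List.pyGetD (hostParts host) 1 ""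
-- the (prefix, suffix) pair a multi-part host contributes
def toPair (host : String) : Option (String × String) :=
  if (hostParts host).length > 1 then some (keyOf host, sufOf host) else none
def pairsOf (hostlist : List String) : List (String × String) := hostlist.filterMap toPair

-- Set.update is the identity when every added element is already present
theorem set_update_of_sub {K : PySem.Set String} {xs : List String}
    (h : ∀ x ∈ xs, x ∈ K) : K.update xs = K := by
  induction xs generalizing K with
  | nil => exact PySem.Set.update_nil K
  | cons a xs ih =>
    rw [PySem.Set.update_cons, PySem.Set.add_of_mem (h a (by simp))]
    exact ih (fun x hx => h x (by simp [hx]))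

-- ---- A's loops ----

-- A's second loop is the modify-append fold over the contributed pairs
theorem loopA2_eq_pairs (hs : List String) (d : PySem.Dict String (List String)) :
    hs.foldl
      (fun r host =>
        let p := (PySem.Str.split? host "__").getD []
        if p.length > 1 then
          r.modify (PySem.List.pyGetD p 0 "") [] (fun l => l ++ [PySem.List.pyGetD p 1 ""])
        else r) d
    = (pairsOf hs).foldl (fun d p => d.modify p.1 [] (fun l => l ++ [p.2])) d := by
  induction hs generalizing d with
  | nil => rfl
  | cons h hs ih =>
    simp only [List.foldl, pairsOf, List.filterMap_cons]
    by_cases hc : ((PySem.Str.split? h "__").getD []).length > 1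
    · have hp : toPair h = some (keyOf h, sufOf h) := by simp [toPair, hostParts, hc]
      rw [if_pos hc, hp]
      simpa only [List.foldl, pairsOf, keyOf, sufOf, hostParts] using ih _
    · have hp : toPair h = none := by simp [toPair, hostParts, hc]
      rw [if_neg hc, hp]
      simpa only [pairsOf] using ih d

-- after A's first loop every lookup (default []) is []
theorem getD_loopA1 (hs : List String) (d : PySem.Dict String (List String))
    (hd : ∀ c, d.getD c [] = []) (c : String) :
    (hs.foldl
      (fun r host =>
        let p := (PySem.Str.split? host "__").getD []
        r.insert (PySem.List.pyGetD p 0 "") []) d).getD c [] = [] := by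
  induction hs generalizing d with
  | nil => exact hd c
  | cons h hs ih =>
    refine ih _ (fun c' => ?_)
    by_cases hc : c' = (PySem.List.pyGetD ((PySem.Str.split? h "__").getD []) 0 "")
    · subst hc; exact PySem.Dict.getD_insert_self d _ [] []
    · rw [PySem.Dict.getD_insert_of_ne d [] [] hc]; exact hd c'

-- every contributed pair's key is some host's key
theorem pairs_fst_sub (hs : List String) :
    ∀ x ∈ (pairsOf hs).map (·.1), x ∈ hs.map keyOf := by
  intro x hx
  simp only [List.mem_map, pairsOf, List.mem_filterMap] at hx
  obtain ⟨⟨a, b⟩, ⟨h, hh, hp⟩, rfl⟩ := hx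
  simp only [toPair] at hp
  split at hp
  · cases hp; exact List.mem_map.mpr ⟨h, hh, rfl⟩
  · cases hp

-- ---- bridging A's per-key value to B's filtered scan of the split list ----

theorem pairs_filter_eq_parts_filter (hs : List String) (k : String) :
    ((pairsOf hs).filter (fun p => p.1 == k)).map (·.2)
    = ((hs.map hostParts).filter
        (fun p => decide (p.length > 1) && (PySem.List.pyGetD p 0 "" == k))).map
        (fun p => PySem.List.pyGetD p 1 "") := by
  induction hs with
  | nil => rfl
  | cons h hs ih =>
    simp only [pairsOf, List.filterMap_cons, List.map_cons, List.filter_cons]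
    by_cases hc : (hostParts h).length > 1
    · have hp : toPair h = some (keyOf h, sufOf h) := by simp [toPair, hc]
      rw [hp]
      by_cases hk : keyOf h = k
      · simp only [List.filter_cons, hk]
        simp only [keyOf] at hk
        simp [hc, hk, ← ih, pairsOf, sufOf]
      · simp only [List.filter_cons]
        have hk' : (keyOf h == k) = false := beq_eq_false_iff_ne.mpr hk
        simp only [keyOf] at hk'
        simp [hc, hk', ← ih, pairsOf, keyOf]
    · have hp : toPair h = none := by simp [toPair, hc]
      rw [hp]
      simp [hc, ← ih, pairsOf]

-- ===== VERDICT (by name: the statement is the Claim_ definition above) =====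
theorem genHostTree_spec : Claim_equal_genHostTree := by
  intro hs _
  show genHostTree hs = genHostTree_alt hs
  unfold genHostTree genHostTree_alt
  rw [loopA2_eq_pairs]
  set dA1 : PySem.Dict String (List String) := hs.foldl
    (fun r host =>
      let p := (PySem.Str.split? host "__").getD []
      r.insert (PySem.List.pyGetD p 0 "") []) PySem.Dict.empty with hdA1
  set dA : PySem.Dict String (List String) :=
    (pairsOf hs).foldl (fun d p => d.modify p.1 [] (fun l => l ++ [p.2])) dA1 with hdA
  have hkA1 : dA1.keys = PySem.Set.ofList (hs.map keyOf) := by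
    rw [hdA1]
    have h := PySem.Dict.keys_foldl_insert_key hs
      (fun host => PySem.List.pyGetD ((PySem.Str.split? host "__").getD []) 0 "")
      (fun _ _ => ([] : List String)) PySem.Dict.empty
    simpa [PySem.Dict.keys_empty, PySem.Set.update_nil_left, keyOf, hostParts] using h
  have hkA : dA.keys = PySem.Set.ofList (hs.map keyOf) := by
    rw [hdA]
    have h := PySem.Dict.keys_foldl_modify_key (pairsOf hs) (·.1) ([] : List String)
      (fun _ p => fun l => l ++ [p.2]) dA1
    rw [h, hkA1]
    exact set_update_of_sub (fun x hx =>
      (PySem.Set.mem_ofList _ _).mpr (pairs_fst_sub hs x hx))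
  have hnA : dA.keys.Nodup := by rw [hkA]; exact PySem.Set.nodup_ofList _
  have hg : ∀ k, dA.getD k []
      = ((hs.map (fun host => (PySem.Str.split? host "__").getD [])).filter
          (fun p => decide (p.length > 1) && (PySem.List.pyGetD p 0 "" == k))).map
          (fun p => PySem.List.pyGetD p 1 "") := by
    intro k
    rw [hdA, PySem.Dict.getD_foldl_modify_append,
        getD_loopA1 hs PySem.Dict.empty (fun _ => rfl) k,
        List.nil_append]
    exact pairs_filter_eq_parts_filter hs k
  have hkeys : PySem.List.dedup
      ((hs.map (fun host => (PySem.Str.split? host "__").getD [])).map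
        (fun p => PySem.List.pyGetD p 0 "")) = dA.keys := by
    rw [hkA, PySem.List.dedup_eq_ofList, List.map_map]
    rfl
  rw [PySem.Dict.items_eq_map_keys dA hnA []]
  simp only [hkeys]
  exact List.map_congr_left (fun k _ => by rw [hg k])
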